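-- pv_equiv track=rewrite | github.com/DanielBok/aoc | 2018/d20.py | build_dist_dict
-- ===== SOURCE A (Python) =====
-- def next_position(curr, letter):
--     x, y = curr
--     if letter == 'N':
--         return x, y + 1
--     if letter == 'S':
--         return x, y - 1
--     if letter == 'E':
--         return x + 1, y
--     if letter == 'W':
--         return x - 1, y
--
-- def build_dist_dict(path):
--     curr = (0, 0)
--     dist = {(0, 0): 0}
--     stack = []
--
--     for letter in path:
--         if letter in {'N', 'S', 'E', 'W'}:
--             next_pos = next_position(curr, letter)
--             if next_pos not in dist:
--                 dist[next_pos] = dist[curr] + 1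
--             curr = next_pos
--         elif letter == '(':
--             stack.append(curr)
--         elif letter == '|':
--             curr = stack[-1]
--         elif letter == ')':
--             curr = stack.pop()
--
--     return dist
-- ===== SOURCE B (Python) =====
-- def build_dist_dict(path):
--     dist = {(0, 0): 0}
--
--     def parse(i, start, pos):
--         """Recursive descent over the nested group structure.
--
--         Scans path from index i, consuming '|'-separated alternatives up to
--         and including the group's closing ')' (or the end of the input);
--         returns the index just past what it consumed."""
--         while i < len(path):
--             c = path[i]
--             i += 1
--             if c == 'N':
--                 nxt = (pos[0], pos[1] + 1)
--             elif c == 'S':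
--                 nxt = (pos[0], pos[1] - 1)
--             elif c == 'E':
--                 nxt = (pos[0] + 1, pos[1])
--             elif c == 'W':
--                 nxt = (pos[0] - 1, pos[1])
--             elif c == '(':
--                 i = parse(i, pos, pos)
--                 continue
--             elif c == '|':
--                 pos = start
--                 continue
--             elif c == ')':
--                 return i
--             else:
--                 continue
--             if nxt not in dist:
--                 dist[nxt] = dist[pos] + 1
--             pos = nxt
--         return i
--
--     parse(0, (0, 0), (0, 0))
--     return dist
-- ===== Notes on version B (the rewrite author's own statement) =====
-- stated objective: alternative
-- what changed: A scans the string once with an explicit stack of saved positions; B is a recursive-descent parser over the nested group structure whose helper consumes one group body per call, restarting each alternative of a group from the group-entry position and returning control just past the group's closing parenthesis.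
-- outside the precondition, e.g. on build_dist_dict('|'): A raises IndexError, B returns {(0, 0): 0}; on build_dist_dict(')'): A raises IndexError, B returns {(0, 0): 0}
import Mathlib
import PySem

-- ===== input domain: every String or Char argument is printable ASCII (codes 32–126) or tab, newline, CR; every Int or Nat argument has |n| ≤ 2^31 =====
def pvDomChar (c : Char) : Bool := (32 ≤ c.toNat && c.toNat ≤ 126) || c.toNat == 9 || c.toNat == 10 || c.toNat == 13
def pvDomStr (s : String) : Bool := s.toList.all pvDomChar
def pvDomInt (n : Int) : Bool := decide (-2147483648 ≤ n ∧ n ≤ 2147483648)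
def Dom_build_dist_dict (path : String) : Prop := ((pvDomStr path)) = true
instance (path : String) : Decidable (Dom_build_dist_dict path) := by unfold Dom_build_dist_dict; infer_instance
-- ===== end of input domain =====

-- B rewrites A's explicit-stack scan as a recursive-descent parser over the nested group
-- structure (objective: alternative decomposition; same distances, same insertion order).
-- Return-value equivalence only; neither program mutates its argument.

-- ===== PORT A =====
-- port of next_position (returns none for a non-NSEW letter, like Python's implicit None;
-- only ever called under the NSEW guard)
def next_position (curr : Int × Int) (letter : Char) : Option (Int × Int) :=
  if letter = 'N' then some (curr.1, curr.2 + 1)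
  else if letter = 'S' then some (curr.1, curr.2 - 1)
  else if letter = 'E' then some (curr.1 + 1, curr.2)
  else if letter = 'W' then some (curr.1 - 1, curr.2)
  else none

-- one iteration of A's for-loop; state = (curr, dist, stack), stack top kept at the head.
-- On '|'/')' with an empty stack Python raises IndexError (excluded by Pre_); headD/tail
-- stand in there.
def stepA (s : (Int × Int) × PySem.Dict (Int × Int) Int × List (Int × Int)) (letter : Char) :
    (Int × Int) × PySem.Dict (Int × Int) Int × List (Int × Int) :=
  if letter = 'N' ∨ letter = 'S' ∨ letter = 'E' ∨ letter = 'W' then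
    let next_pos := (next_position s.1 letter).getD s.1
    let dist := if s.2.1.contains next_pos then s.2.1
                else s.2.1.insert next_pos (s.2.1.getD s.1 0 + 1)
    (next_pos, dist, s.2.2)
  else if letter = '(' then (s.1, s.2.1, s.1 :: s.2.2)
  else if letter = '|' then (s.2.2.headD s.1, s.2.1, s.2.2)
  else if letter = ')' then (s.2.2.headD s.1, s.2.1, s.2.2.tail)
  else s

def build_dist_dict (path : String) : List (Int × Int × Int) :=
  let fin := path.toList.foldl stepA
    (((0 : Int), (0 : Int)), PySem.Dict.ofList [(((0 : Int), (0 : Int)), (0 : Int))], [])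
  fin.2.1.items.map (fun p => (p.1.1, p.1.2, p.2))

-- ===== PORT B =====
-- recursive-descent helper: consumes one group body ('|'-separated alternatives) up to and
-- including its ')' (or to the end of the input) and returns (remainder, dist).
-- `fuel` is only a structural-termination guard; it is called with fuel = rest.length and
-- each step consumes at least one character, so the fuel-out branch is never reached.
def parseB (fuel : Nat) (rest : List Char) (start pos : Int × Int)
    (dist : PySem.Dict (Int × Int) Int) : List Char × PySem.Dict (Int × Int) Int :=
  match fuel, rest with
  | 0, _ => (rest, dist)
  | _ + 1, [] => ([], dist)
  | fuel + 1, c :: tl =>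
    if c = 'N' ∨ c = 'S' ∨ c = 'E' ∨ c = 'W' then
      let nxt : Int × Int :=
        if c = 'N' then (pos.1, pos.2 + 1)
        else if c = 'S' then (pos.1, pos.2 - 1)
        else if c = 'E' then (pos.1 + 1, pos.2)
        else (pos.1 - 1, pos.2)
      let dist' := if dist.contains nxt then dist else dist.insert nxt (dist.getD pos 0 + 1)
      parseB fuel tl start nxt dist'
    else if c = '(' then
      let r := parseB fuel tl pos pos dist
      parseB fuel r.1 start pos r.2
    else if c = '|' then parseB fuel tl start start dist
    else if c = ')' then (tl, dist)
    else parseB fuel tl start pos dist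

def build_dist_dict_alt (path : String) : List (Int × Int × Int) :=
  let r := parseB path.toList.length path.toList ((0 : Int), (0 : Int)) ((0 : Int), (0 : Int))
    (PySem.Dict.ofList [(((0 : Int), (0 : Int)), (0 : Int))])
  r.2.items.map (fun p => (p.1.1, p.1.2, p.2))

-- ===== PRECONDITION & SPEC =====
-- Pre_ excludes exactly the strings on which A raises IndexError: an alternation bar or a
-- closing parenthesis occurs with no unmatched opening parenthesis before it (empty stack).
def Pre_build_dist_dict (path : String) : Prop :=
  ∀ i ∈ List.range path.toList.length,
    (path.toList.getD i ' ' = '|' ∨ path.toList.getD i ' ' = ')') →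
      (path.toList.take i).count ')' < (path.toList.take i).count '('
instance (path : String) : Decidable (Pre_build_dist_dict path) := by
  unfold Pre_build_dist_dict; infer_instance

def pvWitness_build_dist_dict : String := "NN(EE|WS(N|)W)S"

def Spec_build_dist_dict (path : String) (out : List (Int × Int × Int)) : Prop :=
  out = build_dist_dict_alt path
instance (path : String) (out : List (Int × Int × Int)) : Decidable (Spec_build_dist_dict path out) := by
  unfold Spec_build_dist_dict; infer_instance

-- ===== CLAIM (what is proved, stated in full; the proofs are below) =====
def Claim_equal_build_dist_dict : Prop := ∀ (path : String), Dom_build_dist_dict path →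
  Pre_build_dist_dict path → Spec_build_dist_dict path (build_dist_dict path)

-- ===== LEMMAS AND PROOFS =====

-- the prefix-balance condition, on char lists (Pre_ is exactly this on path.toList)
def PBal (cs : List Char) : Prop :=
  ∀ i ∈ List.range cs.length,
    (cs.getD i ' ' = '|' ∨ cs.getD i ' ' = ')') →
      (cs.take i).count ')' < (cs.take i).count '('

theorem PBal_transfer (a cs : List Char) (h : PBal (a ++ cs))
    (hc : a.count '(' = a.count ')') : PBal cs := by
  intro i hi hpos
  simp only [List.mem_range] at hi
  have h2 := h (a.length + i) (by simp [List.mem_range]; omega)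
    (by simpa [List.getD, List.getElem?_append_right] using hpos)
  rw [List.take_length_add_append, List.count_append, List.count_append] at h2
  omega

theorem PBal_head (c : Char) (tl : List Char) (h : PBal (c :: tl))
    (hc : c = '|' ∨ c = ')') : False := by
  have h0 := h 0 (by simp [List.mem_range]) (by simpa [List.getD] using hc)
  simp at h0

theorem parseB_rest_le (fuel : Nat) : ∀ (cs : List Char) (start pos : Int × Int)
    (d : PySem.Dict (Int × Int) Int), (parseB fuel cs start pos d).1.length ≤ cs.length := by
  induction fuel with
  | zero => intro cs s p d; cases cs <;> simp [parseB]
  | succ fuel ih =>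
    intro cs s p d
    cases cs with
    | nil => simp [parseB]
    | cons c tl =>
      simp only [parseB]
      split_ifs <;>
        first
          | exact Nat.le_trans (ih ..) (Nat.le_succ _)
          | exact Nat.le_trans (ih ..) (Nat.le_trans (ih ..) (Nat.le_succ _))
          | exact Nat.le_succ _

-- core lemma: with a nonempty stack, A's fold factors through one parseB call
theorem foldA_parseB (fuel : Nat) : ∀ (cs : List Char), cs.length ≤ fuel →
    ∀ (start curr : Int × Int) (d : PySem.Dict (Int × Int) Int) (st : List (Int × Int)),
    (cs.foldl stepA (curr, d, start :: st)).2.1 =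
      (((parseB fuel cs start curr d).1).foldl stepA
        (start, (parseB fuel cs start curr d).2, st)).2.1 := by
  induction fuel with
  | zero =>
    intro cs hlen start curr d st
    have : cs = [] := List.eq_nil_of_length_eq_zero (Nat.le_zero.mp hlen)
    subst this; simp [parseB]
  | succ fuel ih =>
    intro cs hlen start curr d st
    cases cs with
    | nil => simp [parseB]
    | cons c tl =>
      have htl : tl.length ≤ fuel := by
        simp only [List.length_cons] at hlen; omega
      by_cases h1 : c = 'N' ∨ c = 'S' ∨ c = 'E' ∨ c = 'W'
      · rcases h1 with h | h | h | h <;> subst h <;>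
          simp only [List.foldl_cons, parseB, stepA, next_position] <;> norm_num <;>
          exact ih tl htl _ _ _ _
      · by_cases h2 : c = '('
        · subst h2
          simp only [List.foldl_cons, parseB, stepA, h1, if_false, if_true, if_neg h1]
          norm_num
          rw [ih tl htl curr curr d (start :: st)]
          exact ih (parseB fuel tl curr curr d).1
            (Nat.le_trans (parseB_rest_le ..) htl) start curr _ st
        · by_cases h3 : c = '|'
          · subst h3
            simp only [List.foldl_cons, parseB, stepA, h1, if_neg h1]
            norm_num
            exact ih tl htl start start d st
          · by_cases h4 : c = ')'
            · subst h4
              simp [List.foldl_cons, parseB, stepA, h1]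
            · simp only [List.foldl_cons, parseB, stepA, h1, h2, h3, h4,
                if_neg h1, if_neg h2, if_neg h3, if_neg h4, if_false]
              exact ih tl htl start curr d st

theorem parseB_nil (fuel : Nat) (start pos : Int × Int) (d : PySem.Dict (Int × Int) Int) :
    parseB fuel [] start pos d = ([], d) := by
  cases fuel <;> simp [parseB]

-- shape lemma: parseB's remainder is empty or preceded by a balanced chunk and its ')'
theorem shape_cons (c : Char) (h2 : c ≠ '(') (h4 : c ≠ ')') (tl u rest : List Char)
    (hu : tl = u ++ ')' :: rest) (hc : u.count '(' = u.count ')') :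
    c :: tl = (c :: u) ++ ')' :: rest ∧ (c :: u).count '(' = (c :: u).count ')' := by
  subst hu
  refine ⟨by simp, ?_⟩
  simp [List.count_cons, hc, h2, h4]

theorem shape_paren (tl u1 R1 u2 R2 : List Char)
    (hu1 : tl = u1 ++ ')' :: R1) (hu2 : R1 = u2 ++ ')' :: R2)
    (hc1 : u1.count '(' = u1.count ')') (hc2 : u2.count '(' = u2.count ')') :
    '(' :: tl = ('(' :: u1 ++ ')' :: u2) ++ ')' :: R2 ∧
      ('(' :: u1 ++ ')' :: u2).count '(' = ('(' :: u1 ++ ')' :: u2).count ')' := by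
  subst hu1; subst hu2
  refine ⟨by simp, ?_⟩
  simp [List.count_cons, List.count_append]
  omega

theorem parseB_shape (fuel : Nat) : ∀ (cs : List Char), cs.length ≤ fuel →
    ∀ (start pos : Int × Int) (d : PySem.Dict (Int × Int) Int),
    (parseB fuel cs start pos d).1 = [] ∨
    ∃ u, cs = u ++ ')' :: (parseB fuel cs start pos d).1 ∧ u.count '(' = u.count ')' := by
  induction fuel with
  | zero =>
    intro cs hlen start pos d
    have : cs = [] := List.eq_nil_of_length_eq_zero (Nat.le_zero.mp hlen)
    subst this; left; simp [parseB]
  | succ fuel ih =>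
    intro cs hlen start pos d
    cases cs with
    | nil => left; simp [parseB]
    | cons c tl =>
      have htl : tl.length ≤ fuel := by
        simp only [List.length_cons] at hlen; omega
      by_cases h1 : c = 'N' ∨ c = 'S' ∨ c = 'E' ∨ c = 'W'
      · rcases h1 with h | h | h | h <;> subst h <;>
          (simp only [parseB]; norm_num) <;>
          (rcases ih tl htl start _ _ with h' | ⟨u, hu, hc⟩
           · left; exact h'
           · right
             first
               | exact ⟨_, (shape_cons 'N' (by decide) (by decide) tl u _ hu hc).1,
                   (shape_cons 'N' (by decide) (by decide) tl u _ hu hc).2⟩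
               | exact ⟨_, (shape_cons 'S' (by decide) (by decide) tl u _ hu hc).1,
                   (shape_cons 'S' (by decide) (by decide) tl u _ hu hc).2⟩
               | exact ⟨_, (shape_cons 'E' (by decide) (by decide) tl u _ hu hc).1,
                   (shape_cons 'E' (by decide) (by decide) tl u _ hu hc).2⟩
               | exact ⟨_, (shape_cons 'W' (by decide) (by decide) tl u _ hu hc).1,
                   (shape_cons 'W' (by decide) (by decide) tl u _ hu hc).2⟩)
      · by_cases h2 : c = '('
        · subst h2
          simp only [parseB]; norm_num
          rcases ih (parseB fuel tl pos pos d).1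
              (Nat.le_trans (parseB_rest_le ..) htl) start pos (parseB fuel tl pos pos d).2
            with h' | ⟨u2, hu2, hc2⟩
          · left; exact h'
          · rcases ih tl htl pos pos d with h1' | ⟨u1, hu1, hc1⟩
            · rw [h1'] at hu2; exact absurd hu2 (by simp)
            · right
              have hs := shape_paren tl u1 _ u2 _ hu1 hu2 hc1 hc2
              exact ⟨_, hs.1, hs.2⟩
        · by_cases h3 : c = '|'
          · subst h3
            simp only [parseB]; norm_num
            rcases ih tl htl start start d with h' | ⟨u, hu, hc⟩
            · left; exact h'
            · right
              have hs := shape_cons '|' (by decide) (by decide) tl u _ hu hc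
              exact ⟨_, hs.1, hs.2⟩
          · by_cases h4 : c = ')'
            · subst h4
              simp only [parseB]; norm_num
              right; exact ⟨[], by simp, by simp⟩
            · simp only [parseB, if_neg h1, if_neg h2, if_neg h3, if_neg h4]
              rcases ih tl htl start pos d with h' | ⟨u, hu, hc⟩
              · left; exact h'
              · right
                have hs := shape_cons _ h2 h4 tl u _ hu hc
                exact ⟨_, hs.1, hs.2⟩

-- top level: with an empty stack and a balanced input, A's fold's dist is parseB's dist
theorem foldA_top (fuel : Nat) : ∀ (cs : List Char), cs.length ≤ fuel →
    ∀ (start curr : Int × Int) (d : PySem.Dict (Int × Int) Int), PBal cs →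
    (cs.foldl stepA (curr, d, [])).2.1 = (parseB fuel cs start curr d).2 := by
  induction fuel with
  | zero =>
    intro cs hlen start curr d _
    have : cs = [] := List.eq_nil_of_length_eq_zero (Nat.le_zero.mp hlen)
    subst this; simp [parseB]
  | succ fuel ih =>
    intro cs hlen start curr d hbal
    cases cs with
    | nil => simp [parseB]
    | cons c tl =>
      have htl : tl.length ≤ fuel := by
        simp only [List.length_cons] at hlen; omega
      by_cases h1 : c = 'N' ∨ c = 'S' ∨ c = 'E' ∨ c = 'W'
      · have hbtl : PBal tl := by
          refine PBal_transfer [c] tl hbal ?_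
          rcases h1 with h | h | h | h <;> subst h <;> decide
        rcases h1 with h | h | h | h <;> subst h <;>
          simp only [List.foldl_cons, parseB, stepA, next_position] <;> norm_num <;>
          exact ih tl htl _ _ _ hbtl
      · by_cases h2 : c = '('
        · subst h2
          simp only [List.foldl_cons, parseB, stepA, h1]
          norm_num
          rw [foldA_parseB fuel tl htl curr curr d []]
          rcases parseB_shape fuel tl htl curr curr d with h' | ⟨u, hu, hc⟩
          · rw [h', parseB_nil]; simp
          · set R := (parseB fuel tl curr curr d).1 with hR
            have heq : ('(' :: u ++ [')']) ++ R = '(' :: tl := by rw [hu]; simp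
            have hb' : PBal R := by
              refine PBal_transfer ('(' :: u ++ [')']) R ?_ ?_
              · rw [heq]; exact hbal
              · simp [List.count_cons, List.count_append, hc]
            have hlenR : R.length ≤ fuel := Nat.le_trans (parseB_rest_le ..) htl
            exact ih R hlenR start curr _ hb'
        · by_cases h3 : c = '|'
          · exact absurd (Or.inl h3) (fun h => PBal_head c tl hbal h)
          · by_cases h4 : c = ')'
            · exact absurd (Or.inr h4) (fun h => PBal_head c tl hbal h)
            · have hbtl : PBal tl := by
                refine PBal_transfer [c] tl hbal ?_
                simp [List.count_cons, h2, h4]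
              simp only [List.foldl_cons, parseB, stepA, h1, h2, h3, h4,
                if_neg h1, if_neg h2, if_neg h3, if_neg h4, if_false]
              exact ih tl htl start curr d hbtl

-- ===== VERDICT (by name: the statement is the Claim_ definition above) =====
theorem build_dist_dict_spec : Claim_equal_build_dist_dict := by
  intro path _ hpre
  unfold Spec_build_dist_dict build_dist_dict build_dist_dict_alt
  have := foldA_top path.toList.length path.toList (Nat.le_refl _)
    ((0 : Int), (0 : Int)) ((0 : Int), (0 : Int))
    (PySem.Dict.ofList [(((0 : Int), (0 : Int)), (0 : Int))]) hpre
  simp only [this]
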